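-- pv_equiv track=rewrite | github.com/sayali-sonawane/Algorithm | LeetGoogle.py | braceExpansionI
-- ===== SOURCE A (Python) =====
-- def braceExpansionI(expression):
--     # e = '2[3[a]b]abc'
--     n = len(expression)
--
--     def helper(e, idx):
--         # returns string and index
--         s = []
--         while idx < n:
--             if e[idx] == '[':
--                 loops = 1
--                 if 48 <= ord(e[idx-1]) <= 57:
--                     loops += (int(e[idx-1]) - 1)
--                 idx += 1
--                 t, idx = helper(e, idx)
--                 t = t*(loops)
--                 s.append(t)
--             elif e[idx] == ']':
--                 idx += 1
--                 break
--             elif 48 <= ord(e[idx]) <= 57: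
--                 # s[-1][-1][-1] = int(e[idx])
--                 idx += 1
--                 continue
--             else:
--                 s.append(e[idx])
--                 idx += 1
--
--         s = ''.join(s)
--
--         return s, idx
--
--     res, _ = helper(expression, 0)
--
--     return res
-- ===== SOURCE B (Python) =====
-- def braceExpansionI(expression):
--     stack = []      # frames of (parent_list, loops)
--     current = []
--     for idx, ch in enumerate(expression):
--         if ch == '[':
--             prev = expression[idx - 1]
--             loops = int(prev) if prev.isdigit() else 1
--             stack.append((current, loops))
--             current = []
--         elif ch == ']':
--             if not stack:
--                 break
--             parent, loops = stack.pop()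
--             parent.append(''.join(current) * loops)
--             current = parent
--         elif ch.isdigit():
--             continue
--         else:
--             current.append(ch)
--     while stack:
--         parent, loops = stack.pop()
--         parent.append(''.join(current) * loops)
--         current = parent
--     return ''.join(current)
-- ===== Notes on version B (the rewrite author's own statement) =====
-- stated objective: alternative
-- what changed: Replaces A's recursive-descent helper (which recurses on each opening bracket and returns on each closing one) with a single iterative pass keeping an explicit stack of (parent_list, loops) frames: push a frame at an opening bracket, pop-join-repeat at a closing one (stopping the scan at an unmatched closing bracket), and unwind leftover frames at the end.
import Mathlib
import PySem

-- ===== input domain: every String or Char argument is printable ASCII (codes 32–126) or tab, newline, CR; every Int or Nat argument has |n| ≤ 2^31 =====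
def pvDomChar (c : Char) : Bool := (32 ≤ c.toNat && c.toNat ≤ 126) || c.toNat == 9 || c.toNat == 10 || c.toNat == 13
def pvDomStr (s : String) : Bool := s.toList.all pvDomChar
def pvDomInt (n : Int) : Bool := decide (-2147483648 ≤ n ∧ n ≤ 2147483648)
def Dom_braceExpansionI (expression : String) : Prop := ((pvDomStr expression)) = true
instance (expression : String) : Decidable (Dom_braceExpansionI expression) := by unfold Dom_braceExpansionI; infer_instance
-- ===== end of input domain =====

-- B replaces A's recursive-descent helper by a single iterative pass over the characters
-- with an explicit stack of (parent, loops) frames (objective: alternative, same cost).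

-- Python's  s * k  on a string (k ≤ 0 gives ""); used by both ports.
def pyStrMul (s : String) (k : Int) : String := String.join (List.replicate k.toNat s)

-- e[idx-1]: Python indexing incl. the negative wrap at idx = 0; both Pythons evaluate it only
-- when idx < len(e), so it is always in range and the ' ' default is never taken.
def pyPrev (e : List Char) (idx : Nat) : Char := (PySem.List.pyGet? e ((idx : Int) - 1)).getD ' '

-- ===== PORT A =====
-- A's  loops = 1; if digit: loops += int(e[idx-1]) - 1
def aLoops (e : List Char) (idx : Nat) : Int :=
  if 48 ≤ (pyPrev e idx).toNat ∧ (pyPrev e idx).toNat ≤ 57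
  then 1 + (((pyPrev e idx).toNat : Int) - 48 - 1) else 1

-- A's helper(e, idx) with its while-loop merged in as the accumulator s (helper(e,idx) = aLoop e idx []).
-- The returned index carries idx ≤ j (needed for termination of the loop continuation after the recursive call).
def aLoop (e : List Char) (idx : Nat) (s : List String) : String × {j : Nat // idx ≤ j} :=
  if h : idx < e.length then
    if e[idx] = '[' then
      match aLoop e (idx + 1) [] with
      | (t, ⟨j1, hj1⟩) =>
        match aLoop e j1 (s ++ [pyStrMul t (aLoops e idx)]) with
        | (r, ⟨j2, hj2⟩) => (r, ⟨j2, by omega⟩)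
    else if e[idx] = ']' then (String.join s, ⟨idx + 1, by omega⟩)
    else if 48 ≤ (e[idx]).toNat ∧ (e[idx]).toNat ≤ 57 then
      match aLoop e (idx + 1) s with
      | (r, ⟨j, hj⟩) => (r, ⟨j, by omega⟩)
    else
      match aLoop e (idx + 1) (s ++ [String.singleton e[idx]]) with
      | (r, ⟨j, hj⟩) => (r, ⟨j, by omega⟩)
  else (String.join s, ⟨idx, Nat.le_refl idx⟩)
termination_by e.length - idx
decreasing_by all_goals omega

def braceExpansionI (expression : String) : String :=
  (aLoop expression.toList 0 []).1

-- ===== PORT B =====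
-- Source B's  loops = int(prev) if prev.isdigit() else 1   (int of a single ASCII digit char is ord - 48, exact here)
def bLoops (e : List Char) (idx : Nat) : Int :=
  if (pyPrev e idx).isDigit then (((pyPrev e idx).toNat : Int) - 48) else 1

-- Source B's trailing 'while stack:' unwinding loop
def bUnwind (stack : List (List String × Int)) (cur : List String) : String :=
  match stack with
  | [] => String.join cur
  | (p, l) :: st => bUnwind st (p ++ [pyStrMul (String.join cur) l])

-- Source B's 'for idx, ch in enumerate(expression)' loop; break = return bUnwind [] cur (the stack is empty there)
def bLoop (e : List Char) (stack : List (List String × Int)) (cur : List String) (idx : Nat) : String :=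
  if h : idx < e.length then
    if e[idx] = '[' then
      bLoop e ((cur, bLoops e idx) :: stack) [] (idx + 1)
    else if e[idx] = ']' then
      match stack with
      | [] => bUnwind [] cur
      | (p, l) :: st => bLoop e st (p ++ [pyStrMul (String.join cur) l]) (idx + 1)
    else if (e[idx]).isDigit then bLoop e stack cur (idx + 1)
    else bLoop e stack (cur ++ [String.singleton e[idx]]) (idx + 1)
  else bUnwind stack cur
termination_by e.length - idx

def braceExpansionI_alt (expression : String) : String :=
  bLoop expression.toList [] [] 0

-- ===== PRECONDITION & SPEC =====
def Spec_braceExpansionI (expression : String) (out : String) : Prop := out = braceExpansionI_alt expression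
instance (expression : String) (out : String) : Decidable (Spec_braceExpansionI expression out) := by unfold Spec_braceExpansionI; infer_instance

-- ===== CLAIM (what is proved, stated in full; the proofs are below) =====
def Claim_equal_braceExpansionI : Prop := ∀ (expression : String), Dom_braceExpansionI expression → Spec_braceExpansionI expression (braceExpansionI expression)

-- ===== LEMMAS AND PROOFS =====

lemma isDigit_iff (c : Char) : c.isDigit = true ↔ (48 ≤ c.toNat ∧ c.toNat ≤ 57) := by
  unfold Char.isDigit
  rw [Bool.and_eq_true, decide_eq_true_iff, decide_eq_true_iff, ge_iff_le,
    UInt32.le_iff_toNat_le, UInt32.le_iff_toNat_le]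
  exact Iff.rfl

lemma loops_eq (e : List Char) (idx : Nat) : bLoops e idx = aLoops e idx := by
  unfold bLoops aLoops
  by_cases h : 48 ≤ (pyPrev e idx).toNat ∧ (pyPrev e idx).toNat ≤ 57
  · rw [if_pos ((isDigit_iff _).mpr h), if_pos h]; ring
  · rw [if_neg (fun hd => h ((isDigit_iff _).mp hd)), if_neg h]

lemma key_base (e : List Char) (idx : Nat) (cur : List String)
    (stack : List (List String × Int)) (hge : ¬ idx < e.length) :
    bLoop e stack cur idx =
      (match stack with
       | [] => (aLoop e idx cur).1
       | (p, l) :: st =>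
           bLoop e st (p ++ [pyStrMul (aLoop e idx cur).1 l]) (aLoop e idx cur).2.val) := by
  match stack with
  | [] =>
    rw [bLoop, aLoop]
    simp [hge, bUnwind]
  | (p, l) :: st =>
    rw [aLoop]
    simp only [dif_neg hge]
    conv_rhs => rw [bLoop.eq_def]
    simp only [dif_neg hge]
    rw [bLoop.eq_def]
    simp [hge, bUnwind]

lemma key : ∀ (k : Nat) (e : List Char) (idx : Nat) (cur : List String)
    (stack : List (List String × Int)), e.length - idx ≤ k →
    bLoop e stack cur idx =
      (match stack with
       | [] => (aLoop e idx cur).1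
       | (p, l) :: st =>
           bLoop e st (p ++ [pyStrMul (aLoop e idx cur).1 l]) (aLoop e idx cur).2.val) := by
  intro k
  induction k with
  | zero =>
    intro e idx cur stack hk
    exact key_base e idx cur stack (by omega)
  | succ k ih =>
    intro e idx cur stack hk
    by_cases hlt : idx < e.length
    · by_cases hb : e[idx]'hlt = '['
      · rcases h1 : aLoop e (idx + 1) [] with ⟨t1, j1, hj1⟩
        rcases h2 : aLoop e j1 (cur ++ [pyStrMul t1 (aLoops e idx)]) with ⟨r, j2, hj2⟩
        have hA1 : (aLoop e idx cur).1 = r := by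
          rw [aLoop, h1]; simp [hlt, hb, h2]
        have hA2 : (aLoop e idx cur).2.val = j2 := by
          rw [aLoop, h1]; simp [hlt, hb, h2]
        rw [bLoop.eq_def]
        simp only [dif_pos hlt, if_pos hb]
        rw [loops_eq]
        rw [ih e (idx + 1) [] ((cur, aLoops e idx) :: stack) (by omega)]
        simp only [h1]
        rw [ih e j1 (cur ++ [pyStrMul t1 (aLoops e idx)]) stack (by omega)]
        cases stack <;> simp [h2, hA1, hA2]
      · by_cases hc : e[idx]'hlt = ']'
        · have hA1 : (aLoop e idx cur).1 = String.join cur := by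
            rw [aLoop]; simp [hlt, hc]
          have hA2 : (aLoop e idx cur).2.val = idx + 1 := by
            rw [aLoop]; simp [hlt, hc]
          rw [bLoop.eq_def]
          simp only [dif_pos hlt, if_neg hb, if_pos hc]
          cases stack <;> simp [bUnwind, hA1, hA2]
        · by_cases hd : 48 ≤ (e[idx]'hlt).toNat ∧ (e[idx]'hlt).toNat ≤ 57
          · have hdig : (e[idx]'hlt).isDigit = true := (isDigit_iff _).mpr hd
            rcases h3 : aLoop e (idx + 1) cur with ⟨r, j, hj⟩
            have hA1 : (aLoop e idx cur).1 = r := by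
              rw [aLoop]; simp [hlt, hb, hc, hd, h3]
            have hA2 : (aLoop e idx cur).2.val = j := by
              rw [aLoop]; simp [hlt, hb, hc, hd, h3]
            rw [bLoop.eq_def]
            simp only [dif_pos hlt, if_neg hb, if_neg hc, hdig, if_pos]
            rw [ih e (idx + 1) cur stack (by omega)]
            cases stack <;> simp [h3, hA1, hA2]
          · have hdig : ¬ (e[idx]'hlt).isDigit = true := fun h => hd ((isDigit_iff _).mp h)
            rcases h3 : aLoop e (idx + 1) (cur ++ [String.singleton (e[idx]'hlt)]) with ⟨r, j, hj⟩
            have hA1 : (aLoop e idx cur).1 = r := by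
              rw [aLoop]; simp [hlt, hb, hc, hd, h3]
            have hA2 : (aLoop e idx cur).2.val = j := by
              rw [aLoop]; simp [hlt, hb, hc, hd, h3]
            rw [bLoop.eq_def]
            simp only [dif_pos hlt, if_neg hb, if_neg hc]
            rw [if_neg hdig]
            rw [ih e (idx + 1) (cur ++ [String.singleton (e[idx]'hlt)]) stack (by omega)]
            cases stack <;> simp [h3, hA1, hA2]
    · exact key_base e idx cur stack hlt

-- ===== VERDICT (by name: the statement is the Claim_ definition above) =====
theorem braceExpansionI_spec : Claim_equal_braceExpansionI := by
  intro e _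
  unfold Spec_braceExpansionI braceExpansionI braceExpansionI_alt
  exact (key e.toList.length e.toList 0 [] [] (by omega)).symm
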